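-- pv_equiv track=rewrite | github.com/zxwtry/Python | Python算法教程/P084_最大排列问题.py | loop_max_perm
-- ===== SOURCE A (Python) =====
-- def loop_max_perm(M):
--     n = 0 if M == None else len(M)
--     A, count = set(range(n)), [0]*n
--     for i in M: count[i] += 1
--     Q = [i for i in A if count[i] == 0]
--     while Q:
--         i = Q.pop()
--         A.remove(i)
--         j = M[i]
--         count[j] -= 1
--         if count[j] == 0:
--             Q.append(j)
--     return A
-- ===== SOURCE B (Python) =====
-- def loop_max_perm(M):
--     n = 0 if M == None else len(M)
--     f = [x % n for x in M]
--     alive = [True] * n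
--     for _ in range(n):
--         image = [False] * n
--         for i in range(n):
--             if alive[i]:
--                 image[f[i]] = True
--         alive = image
--     return {i for i in range(n) if alive[i]}
-- ===== Notes on version B (the rewrite author's own statement) =====
-- stated objective: alternative
-- what changed: Replaces the in-degree counter plus worklist peeling by n-fold iteration of the image map of the functional graph i->f[i] (f = M normalized mod n) over boolean arrays, a greatest-fixpoint computation whose stable image is exactly the surviving set.
-- outside the precondition, e.g. on loop_max_perm([1, 2, 2, -3]): A returns {2}, B returns {2}; on loop_max_perm([-3, 2, 2, 1]): A raises KeyError, B returns {2}; on loop_max_perm([4]): A raises IndexError, B returns {0}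
import Mathlib
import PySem

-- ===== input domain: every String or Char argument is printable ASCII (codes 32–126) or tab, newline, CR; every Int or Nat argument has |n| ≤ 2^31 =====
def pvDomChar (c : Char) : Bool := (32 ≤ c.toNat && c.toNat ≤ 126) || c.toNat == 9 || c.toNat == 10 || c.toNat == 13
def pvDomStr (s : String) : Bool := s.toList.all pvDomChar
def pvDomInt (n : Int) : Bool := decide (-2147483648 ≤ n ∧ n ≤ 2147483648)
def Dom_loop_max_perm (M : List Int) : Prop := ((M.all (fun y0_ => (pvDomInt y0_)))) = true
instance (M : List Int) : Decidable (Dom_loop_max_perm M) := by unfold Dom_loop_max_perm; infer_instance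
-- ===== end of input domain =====

-- B iterates the image map of the functional graph i → M[i] (indices normalized mod n, exactly
-- Python's negative-index wraparound) instead of A's in-degree counting + worklist peeling; the
-- equivalence is about the returned set (both ports list its elements in ascending order).

-- ===== PORT A =====
-- count[i] += delta with Python indexing (IndexError cases are excluded by Pre_)
def pvAdjust (count : List Int) (i : Int) (delta : Int) : List Int :=
  PySem.List.pySetD count i (PySem.List.pyGetD count i 0 + delta)

-- length fact used by the termination measure of the while-loop
theorem pvRemove?_lt {A A' : List Int} {i : Int}
    (h : PySem.Set.remove? A i = some A') : A'.length < A.length := by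
  simp only [PySem.Set.remove?, PySem.Set.discard] at h
  split at h
  · cases h
    next hc =>
      have hm : i ∈ A := (PySem.Set.contains_iff A i).1 hc
      exact List.length_filter_lt_length_iff_exists.2 ⟨i, hm, by simp⟩
  · simp at h

-- the 'while Q:' loop of A: pop the last element, remove it from A,
-- decrement count[M[i]], append M[i] to Q when its count reaches 0
def pvPeel (M : List Int) (A : List Int) (count : List Int) (Q : List Int) : List Int :=
  match Q with
  | [] => A
  | q :: qs =>
    match hp : PySem.List.pop? (q :: qs) (-1) with
    | none => A      -- unreachable: the list is nonempty
    | some (i, Q') =>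
      match hr : PySem.Set.remove? A i with
      | none => A    -- Python raises KeyError here; Pre_ excludes this
      | some A' =>
        let j := PySem.List.pyGetD M i 0
        let count' := pvAdjust count j (-1)
        if PySem.List.pyGetD count' j 0 = 0 then
          pvPeel M A' count' (Q' ++ [j])
        else
          pvPeel M A' count' Q'
  termination_by 2 * A.length + Q.length
  decreasing_by
  all_goals
    have h1 := pvRemove?_lt hr
    have h2 := PySem.List.length_of_pop?_eq_some (q :: qs) hp
    first
      | omega
      | (simp_all; omega)
      | simp_all

def loop_max_perm (M : List Int) : List Int :=
  let n := M.length
  let A : PySem.Set Int := PySem.Set.ofList (PySem.List.pyRange 0 n 1)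
  let count := M.foldl (fun c i => pvAdjust c i 1) (List.replicate n 0)
  let Q := A.filter (fun i => PySem.List.pyGetD count i 0 == 0)
  pvPeel M A count Q

-- ===== PORT B =====
-- f = [x % n for x in M]  (Python's %: floor mod, lands in [0, n))
def pvNorm (M : List Int) : List Int :=
  M.map (fun x => PySem.Int.mod x (M.length : Int))

-- one pass: image = [False]*n; for i in range(n): if alive[i]: image[f[i]] = True
def pvImage (f : List Int) (alive : List Bool) : List Bool :=
  (PySem.List.pyRange 0 f.length 1).foldl
    (fun img i =>
      if PySem.List.pyGetD alive i false then
        PySem.List.pySetD img (PySem.List.pyGetD f i 0) true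
      else img)
    (List.replicate f.length false)

-- the n-fold image iteration and the final collection of surviving indices
def pvBody (f : List Int) : List Int :=
  let n := f.length
  let alive := (PySem.List.pyRange 0 n 1).foldl (fun al _ => pvImage f al)
    (List.replicate n true)
  (PySem.List.pyRange 0 n 1).filter (fun i => PySem.List.pyGetD alive i false)

def loop_max_perm_alt (M : List Int) : List Int := pvBody (pvNorm M)

-- ===== PRECONDITION & SPEC =====
-- the successor function of the functional graph i -> M[i] % n (Python's wraparound)
def pvf (M : List Int) (j : Nat) : Nat :=
  (PySem.Int.mod (M.getD j 0) (M.length : Int)).toNat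

-- Pre_ admits M whose entries are valid Python indices (-n ≤ x < n) and whose negative entries
-- point (after Python's wraparound) at a node lying on a cycle of the graph i -> M[i] % n.
-- Excluded are entries outside [-n, n), on which A raises IndexError in the counting pass, and
-- negative entries aimed at an off-cycle node: such a node is eventually peeled, and when the
-- decrement that zeroes its count comes through the negative entry A enqueues the negative
-- literal and raises KeyError at A.remove; whether that happens on the remaining such inputs
-- depends only on A's accidental LIFO worklist order, and whenever A does return there it
-- returns the same cycle set as B.
def Pre_loop_max_perm (M : List Int) : Prop :=
  (∀ x ∈ M, -(M.length : Int) ≤ x ∧ x < (M.length : Int)) ∧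
  (∀ x ∈ M, x < 0 →
    ∃ k ∈ Finset.Icc 1 M.length,
      (pvf M)^[k] (x + M.length).toNat = (x + M.length).toNat)
instance (M : List Int) : Decidable (Pre_loop_max_perm M) := by
  unfold Pre_loop_max_perm; infer_instance

def pvWitness_loop_max_perm : List Int := [1, 0, 2, -4]

def Spec_loop_max_perm (M : List Int) (out : List Int) : Prop := out = loop_max_perm_alt M
instance (M : List Int) (out : List Int) : Decidable (Spec_loop_max_perm M out) := by
  unfold Spec_loop_max_perm; infer_instance

-- ===== CLAIM (what is proved, stated in full; the proofs are below) =====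
def Claim_equal_loop_max_perm : Prop :=
  ∀ (M : List Int), Dom_loop_max_perm M → Pre_loop_max_perm M →
    Spec_loop_max_perm M (loop_max_perm M)

-- ===== LEMMAS AND PROOFS =====

-- all entries are valid nonnegative indices (holds for the normalized list)
def pvNice (M : List Int) : Prop := ∀ x ∈ M, 0 ≤ x ∧ x < (M.length : Int)

-- Python xs[x] for an index known to be in 0..len-1, as List.getD
theorem pvGetD_int {α : Type} (xs : List α) {x : Int} (d : α)
    (h0 : 0 ≤ x) (h1 : x < (xs.length : Int)) :
    PySem.List.pyGetD xs x d = xs.getD x.toNat d := by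
  rw [PySem.List.pyGetD_eq_getElem xs d h0 h1, List.getD_eq_getElem xs d (by omega)]

-- the functional graph on 0..n-1, and the iterated image sets T k
def pvm (M : List Int) (i : Nat) : Nat := (M.getD i 0).toNat

def pvT (M : List Int) : Nat → Finset Nat
  | 0 => Finset.range M.length
  | k + 1 => (pvT M k).image (pvm M)

-- pvNice in Nat form
theorem pvPre_nat {M : List Int} (hPre : pvNice M) {i : Nat} (hi : i < M.length) :
    pvm M i < M.length ∧ (0 : Int) ≤ M.getD i 0 ∧ M.getD i 0 < M.length := by
  have hm : M.getD i 0 ∈ M := by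
    rw [List.getD_eq_getElem _ _ hi]; exact List.getElem_mem hi
  obtain ⟨h0, h1⟩ := hPre _ hm
  refine ⟨?_, h0, h1⟩
  unfold pvm; omega

theorem pvT_subset_range (M : List Int) (hPre : pvNice M) :
    ∀ k, pvT M k ⊆ Finset.range M.length := by
  intro k
  induction k with
  | zero => simp [pvT]
  | succ k ih =>
    intro j hj
    simp only [pvT, Finset.mem_image] at hj
    obtain ⟨i, hi, rfl⟩ := hj
    have := Finset.mem_range.1 (ih hi)
    exact Finset.mem_range.2 (pvPre_nat hPre this).1

theorem pvT_antitone (M : List Int) (hPre : pvNice M) :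
    ∀ k, pvT M (k + 1) ⊆ pvT M k := by
  intro k
  induction k with
  | zero => exact fun j hj => pvT_subset_range M hPre 1 hj
  | succ k ih =>
    intro j hj
    have h1 : pvT M (k + 1 + 1) = (pvT M (k + 1)).image (pvm M) := rfl
    have h2 : pvT M (k + 1) = (pvT M k).image (pvm M) := rfl
    rw [h1, Finset.mem_image] at hj
    obtain ⟨i, hi, rfl⟩ := hj
    rw [h2, Finset.mem_image]
    exact ⟨i, ih hi, rfl⟩

-- any S with S ⊆ image(S) stays below every T k
theorem pvT_gfp_upper (M : List Int) (S : Finset Nat)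
    (hS0 : S ⊆ Finset.range M.length) (hS : S ⊆ S.image (pvm M)) :
    ∀ k, S ⊆ pvT M k := by
  intro k
  induction k with
  | zero => exact hS0
  | succ k ih =>
    intro j hj
    have := hS hj
    simp only [Finset.mem_image] at this
    obtain ⟨i, hi, rfl⟩ := this
    simp only [pvT, Finset.mem_image]
    exact ⟨i, ih hi, rfl⟩

theorem pvT_stable_step (M : List Int) {k : Nat} (h : pvT M k = pvT M (k + 1)) :
    ∀ j, pvT M (k + j) = pvT M k := by
  intro j
  induction j with
  | zero => rfl
  | succ j ih =>
    have h1 : pvT M (k + (j + 1)) = (pvT M (k + j)).image (pvm M) := rfl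
    have h2 : pvT M (k + 1) = (pvT M k).image (pvm M) := rfl
    rw [h1, ih, ← h2, ← h]

theorem pvT_fixed (M : List Int) (hPre : pvNice M) :
    pvT M M.length = (pvT M M.length).image (pvm M) := by
  have himg : ∀ k, (pvT M k).image (pvm M) = pvT M (k + 1) := fun k => rfl
  by_cases h : ∃ k, k < M.length ∧ pvT M k = pvT M (k + 1)
  · obtain ⟨k, hk, heq⟩ := h
    have e1 : pvT M M.length = pvT M k := by
      have := pvT_stable_step M heq (M.length - k)
      rwa [Nat.add_sub_cancel' (le_of_lt hk)] at this
    have e2 : pvT M (M.length + 1) = pvT M k := by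
      have := pvT_stable_step M heq (M.length + 1 - k)
      rwa [Nat.add_sub_cancel' (by omega)] at this
    rw [himg, e1, e2]
  · push Not at h
    have hcard : ∀ k, k ≤ M.length → (pvT M k).card + k ≤ M.length := by
      intro k
      induction k with
      | zero => intro _; simp [pvT]
      | succ k ih =>
        intro hk
        have hne : pvT M k ≠ pvT M (k + 1) := h k (by omega)
        have hss : pvT M (k + 1) ⊂ pvT M k :=
          HasSubset.Subset.ssubset_of_ne (pvT_antitone M hPre k) (fun e => hne e.symm)
        have := Finset.card_lt_card hss
        have := ih (by omega)
        omega
    have h0 : (pvT M M.length).card = 0 := by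
      have := hcard M.length (le_refl _)
      omega
    have hempty : pvT M M.length = ∅ := Finset.card_eq_zero.1 h0
    rw [hempty]
    simp

-- nodes on a cycle of the graph i → M[i] (M already normalized)
def pvCyc (M : List Int) (t : Nat) : Prop :=
  t < M.length ∧ ∃ k ∈ Finset.Icc 1 M.length, (pvm M)^[k] t = t

theorem pvIter_lt (M : List Int) (hPre : pvNice M) {t : Nat} (ht : t < M.length) :
    ∀ m : Nat, (pvm M)^[m] t < M.length := by
  intro m
  induction m with
  | zero => simpa
  | succ m ih =>
    rw [Function.iterate_succ_apply']
    exact (pvPre_nat hPre ih).1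

-- every cycle node has a cycle predecessor
theorem pvCyc_pred (M : List Int) (hPre : pvNice M) {t : Nat} (h : pvCyc M t) :
    ∃ p : Nat, pvCyc M p ∧ pvm M p = t := by
  obtain ⟨ht, k, hk, hfix⟩ := h
  rw [Finset.mem_Icc] at hk
  refine ⟨(pvm M)^[k-1] t, ⟨?_, ⟨k, Finset.mem_Icc.2 hk, ?_⟩⟩, ?_⟩
  · exact pvIter_lt M hPre ht (k-1)
  · calc (pvm M)^[k] ((pvm M)^[k-1] t)
        = (pvm M)^[k-1] ((pvm M)^[k] t) := by
          rw [← Function.iterate_add_apply, ← Function.iterate_add_apply, Nat.add_comm]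
      _ = (pvm M)^[k-1] t := by rw [hfix]
  · have hstep : (pvm M)^[(k-1)+1] t = t := by
      rw [show (k-1)+1 = k by omega, hfix]
    rw [Function.iterate_succ_apply'] at hstep
    exact hstep

-- ===== A-side: loop invariant and the characterisation of pvPeel =====
def pvCountAt (c : List Int) (x : Int) : Int := PySem.List.pyGetD c x 0

structure pvInv (M A count Q : List Int) : Prop where
  nodupA : A.Nodup
  boundA : ∀ x ∈ A, 0 ≤ x ∧ x < (M.length : Int)
  nodupQ : Q.Nodup
  subQ : ∀ q ∈ Q, q ∈ A
  zeroQ : ∀ q ∈ Q, pvCountAt count q = 0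
  complete : ∀ j ∈ A, pvCountAt count j = 0 → j ∈ Q
  lenC : count.length = M.length
  cnt : ∀ j : Int, 0 ≤ j → j < (M.length : Int) →
    pvCountAt count j = (A.countP (fun i => PySem.List.pyGetD M i 0 == j) : Int)
  removed : ∀ j : Int, 0 ≤ j → j < (M.length : Int) → j ∉ A → pvCountAt count j = 0
  cyc : ∀ t : Nat, pvCyc M t → ((t : Nat) : Int) ∈ A

-- a cycle node always keeps a positive in-count
theorem pvCyc_count_pos (M : List Int) (hPre : pvNice M) {A count Q : List Int}
    (hinv : pvInv M A count Q) {t : Nat} (ht : pvCyc M t) :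
    1 ≤ pvCountAt count ((t : Nat) : Int) := by
  obtain ⟨p, hpC, hpm⟩ := pvCyc_pred M hPre ht
  have hpA := hinv.cyc p hpC
  have htn := ht.1
  have hcnt := hinv.cnt ((t : Nat) : Int) (by positivity) (by exact_mod_cast htn)
  have hgp : PySem.List.pyGetD M ((p : Nat) : Int) 0 = ((t : Nat) : Int) := by
    rw [PySem.List.pyGetD_natCast]
    have hplt := hpC.1
    have hmem : M.getD p 0 ∈ M := by
      rw [List.getD_eq_getElem _ _ hplt]; exact List.getElem_mem _
    have := hPre _ hmem
    unfold pvm at hpm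
    omega
  have hpos : 0 < A.countP (fun y => PySem.List.pyGetD M y 0 == ((t : Nat) : Int)) :=
    List.countP_pos_iff.2 ⟨((p : Nat) : Int), hpA, by simp [hgp]⟩
  rw [hcnt]
  omega

theorem pvAdjust_length (c : List Int) (i δ : Int) : (pvAdjust c i δ).length = c.length := by
  simp [pvAdjust, PySem.List.length_pySetD]

theorem pvAdjust_at (c : List Int) {i : Int} (j δ : Int)
    (hi0 : 0 ≤ i) (hi1 : i < (c.length : Int)) (hj0 : 0 ≤ j) (hj1 : j < (c.length : Int)) :
    pvCountAt (pvAdjust c i δ) j = if j = i then pvCountAt c j + δ else pvCountAt c j := by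
  unfold pvAdjust pvCountAt
  rw [PySem.List.pySetD_of_nonneg c _ hi0]
  rw [PySem.List.pyGetD_eq_getElem _ _ hj0 (by simpa using hj1),
      PySem.List.pyGetD_eq_getElem _ _ hi0 hi1, PySem.List.pyGetD_eq_getElem _ _ hj0 hj1]
  rw [List.getElem_set]
  by_cases h : j = i
  · subst h; rw [if_pos (by omega), if_pos rfl]
  · rw [if_neg (by omega), if_neg h]

theorem pvPop_eq {Q Q' : List Int} {i : Int} (hne : Q ≠ [])
    (hp : PySem.List.pop? Q (-1) = some (i, Q')) : Q = Q' ++ [i] := by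
  have h := hp
  rw [← List.dropLast_append_getLast hne, PySem.List.pop?_last] at h
  simp only [Option.some.injEq, Prod.mk.injEq] at h
  obtain ⟨h1, h2⟩ := h
  rw [← h1, ← h2, List.dropLast_append_getLast hne]

theorem pvPeel_cons (M A count : List Int) (q : Int) (qs : List Int) {i : Int}
    {Q' A' : List Int}
    (hp : PySem.List.pop? (q :: qs) (-1) = some (i, Q'))
    (hr : PySem.Set.remove? A i = some A') :
    pvPeel M A count (q :: qs) =
      if PySem.List.pyGetD (pvAdjust count (PySem.List.pyGetD M i 0) (-1))
          (PySem.List.pyGetD M i 0) 0 = 0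
      then pvPeel M A' (pvAdjust count (PySem.List.pyGetD M i 0) (-1))
          (Q' ++ [PySem.List.pyGetD M i 0])
      else pvPeel M A' (pvAdjust count (PySem.List.pyGetD M i 0) (-1)) Q' := by
  conv_lhs => rw [pvPeel]
  split
  · next heq => rw [hp] at heq; simp at heq
  · next i1 Q1 heq =>
    rw [hp] at heq
    injection heq with h
    injection h with h1 h2
    subst h1
    subst h2
    split
    · next heq2 => rw [hr] at heq2; simp at heq2
    · next A1 heq2 =>
      rw [hr] at heq2
      injection heq2 with h3
      subst h3
      rfl

-- a self-sustaining Int-set below A stays below the removal of a zero-count node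
theorem pvXsub (M : List Int) {A count Q : List Int} (hinv : pvInv M A count Q)
    {A' : List Int} {i : Int}
    (hmem : ∀ y : Int, y ∈ A' ↔ y ≠ i ∧ y ∈ A) (hzi : pvCountAt count i = 0)
    (X : Int → Prop) (hX1 : ∀ x, X x → x ∈ A)
    (hX2 : ∀ x, X x → ∃ y, X y ∧ PySem.List.pyGetD M y 0 = x) :
    ∀ x, X x → x ∈ A' := by
  intro x hx
  obtain ⟨y, hyX, hyval⟩ := hX2 x hx
  have hyA := hX1 y hyX
  have hxb := hinv.boundA x (hX1 x hx)
  have hpos : 0 < A.countP (fun z => PySem.List.pyGetD M z 0 == x) :=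
    List.countP_pos_iff.2 ⟨y, hyA, by simp [hyval]⟩
  have hcx : 1 ≤ pvCountAt count x := by rw [hinv.cnt x hxb.1 hxb.2]; omega
  refine (hmem x).2 ⟨fun e => ?_, hX1 x hx⟩
  rw [e] at hcx
  omega

-- one step of the worklist loop: all bookkeeping facts, and the invariant for both branches
theorem pvStepInv (M : List Int) (hPre : pvNice M) {A count : List Int} {q i : Int}
    {qs Q' A' : List Int}
    (hp : PySem.List.pop? (q :: qs) (-1) = some (i, Q'))
    (hr : PySem.Set.remove? A i = some A')
    (hinv : pvInv M A count (q :: qs)) :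
    (∀ y : Int, y ∈ A' ↔ y ≠ i ∧ y ∈ A) ∧
    A'.Sublist A ∧
    pvCountAt count i = 0 ∧
    (0 ≤ i ∧ i < (M.length : Int)) ∧
    (0 ≤ PySem.List.pyGetD M i 0 ∧ PySem.List.pyGetD M i 0 < (M.length : Int)) ∧
    (∀ x : Int, 0 ≤ x → x < (M.length : Int) →
      pvCountAt (pvAdjust count (PySem.List.pyGetD M i 0) (-1)) x
        = (A'.countP (fun y => PySem.List.pyGetD M y 0 == x) : Int)) ∧
    (PySem.List.pyGetD (pvAdjust count (PySem.List.pyGetD M i 0) (-1))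
        (PySem.List.pyGetD M i 0) 0 = 0 →
      pvInv M A' (pvAdjust count (PySem.List.pyGetD M i 0) (-1))
        (Q' ++ [PySem.List.pyGetD M i 0])) ∧
    (¬ PySem.List.pyGetD (pvAdjust count (PySem.List.pyGetD M i 0) (-1))
        (PySem.List.pyGetD M i 0) 0 = 0 →
      pvInv M A' (pvAdjust count (PySem.List.pyGetD M i 0) (-1)) Q') := by
  have hn := hinv.lenC
  have hQeq : q :: qs = Q' ++ [i] := pvPop_eq (by simp) hp
  have hiQ : i ∈ q :: qs := by rw [hQeq]; exact List.mem_append.2 (Or.inr (by simp))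
  have hiA : i ∈ A := hinv.subQ i hiQ
  have hA' : A' = A.erase i := by
    rw [PySem.Set.remove?_of_mem hiA] at hr
    injection hr with h
    rw [← h, List.Nodup.erase_eq_filter hinv.nodupA i]
    rfl
  have memA' : ∀ y : Int, y ∈ A' ↔ y ≠ i ∧ y ∈ A := by
    intro y; rw [hA']; exact List.Nodup.mem_erase_iff hinv.nodupA
  have hi := hinv.boundA i hiA
  have hzi : pvCountAt count i = 0 := hinv.zeroQ i hiQ
  have hjmem : PySem.List.pyGetD M i 0 ∈ M := by
    rw [pvGetD_int M 0 hi.1 hi.2, List.getD_eq_getElem _ _ (by omega)]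
    exact List.getElem_mem _
  have hj : 0 ≤ PySem.List.pyGetD M i 0 ∧ PySem.List.pyGetD M i 0 < (M.length : Int) :=
    hPre _ hjmem
  have hsplit : ∀ p : Int → Bool,
      A.countP p = A'.countP p + (if p i then 1 else 0) := by
    intro p
    have hperm : A.Perm (i :: A') := by rw [hA']; exact List.perm_cons_erase hiA
    rw [hperm.countP_eq, List.countP_cons]
  have hCj : 1 ≤ pvCountAt count (PySem.List.pyGetD M i 0) := by
    rw [hinv.cnt _ hj.1 hj.2]
    have hpos : 0 < A.countP (fun y => PySem.List.pyGetD M y 0 == PySem.List.pyGetD M i 0) :=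
      List.countP_pos_iff.2 ⟨i, hiA, by simp⟩
    omega
  have hji : PySem.List.pyGetD M i 0 ≠ i := by
    intro e; rw [e] at hCj; omega
  have hjA : PySem.List.pyGetD M i 0 ∈ A := by
    by_contra hnA
    have := hinv.removed _ hj.1 hj.2 hnA
    omega
  have lenC' : (pvAdjust count (PySem.List.pyGetD M i 0) (-1)).length = M.length := by
    rw [pvAdjust_length, hn]
  have hat : ∀ x : Int, 0 ≤ x → x < (M.length : Int) →
      pvCountAt (pvAdjust count (PySem.List.pyGetD M i 0) (-1)) x
        = if x = PySem.List.pyGetD M i 0 then pvCountAt count x - 1 else pvCountAt count x := by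
    intro x h0 h1
    have := pvAdjust_at count (i := PySem.List.pyGetD M i 0) x (-1)
      hj.1 (by rw [hn]; exact hj.2) h0 (by rw [hn]; exact h1)
    rw [this]
    split <;> [omega; rfl]
  have hcnt' : ∀ x : Int, 0 ≤ x → x < (M.length : Int) →
      pvCountAt (pvAdjust count (PySem.List.pyGetD M i 0) (-1)) x
        = (A'.countP (fun y => PySem.List.pyGetD M y 0 == x) : Int) := by
    intro x h0 h1
    rw [hat x h0 h1, hinv.cnt x h0 h1, hsplit (fun y => PySem.List.pyGetD M y 0 == x)]
    by_cases hxj : x = PySem.List.pyGetD M i 0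
    · subst hxj
      rw [if_pos rfl, if_pos (by simp)]
      push_cast
      omega
    · rw [if_neg hxj, if_neg (by simpa using fun e => hxj e.symm)]
      push_cast
      omega
  have hQ'sub : ∀ x ∈ Q', x ∈ q :: qs := by
    intro x hx; rw [hQeq]; exact List.mem_append.2 (Or.inl hx)
  have hQ'nodup : Q'.Nodup ∧ i ∉ Q' := by
    have hnd := hinv.nodupQ
    rw [hQeq] at hnd
    obtain ⟨h1, -, h3⟩ := List.nodup_append.1 hnd
    exact ⟨h1, fun hmem => h3 i hmem i (by simp) rfl⟩
  have hQ'ne_j : ∀ x ∈ Q', x ≠ PySem.List.pyGetD M i 0 := by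
    intro x hx e
    have hz := hinv.zeroQ x (hQ'sub x hx)
    rw [e] at hz
    omega
  have hQ'A' : ∀ x ∈ Q', x ∈ A' := by
    intro x hx
    refine (memA' x).2 ⟨?_, hinv.subQ x (hQ'sub x hx)⟩
    intro e
    exact hQ'nodup.2 (e ▸ hx)
  have hrem' : ∀ x : Int, 0 ≤ x → x < (M.length : Int) → x ∉ A' →
      pvCountAt (pvAdjust count (PySem.List.pyGetD M i 0) (-1)) x = 0 := by
    intro x h0 h1 hnA'
    by_cases hxi : x = i
    · subst hxi
      rw [hat _ h0 h1, if_neg (fun e => hji e.symm)]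
      exact hzi
    · have hxA : x ∉ A := fun hxA => hnA' ((memA' x).2 ⟨hxi, hxA⟩)
      have hxj : x ≠ PySem.List.pyGetD M i 0 := fun e => hxA (e ▸ hjA)
      rw [hat _ h0 h1, if_neg hxj]
      exact hinv.removed x h0 h1 hxA
  have hzQ' : ∀ x ∈ Q', pvCountAt (pvAdjust count (PySem.List.pyGetD M i 0) (-1)) x = 0 := by
    intro x hx
    have hxA := hinv.subQ x (hQ'sub x hx)
    have hxb := hinv.boundA x hxA
    rw [hat _ hxb.1 hxb.2, if_neg (hQ'ne_j x hx)]
    exact hinv.zeroQ x (hQ'sub x hx)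
  have hcomp' : ∀ x ∈ A', x ≠ PySem.List.pyGetD M i 0 →
      pvCountAt (pvAdjust count (PySem.List.pyGetD M i 0) (-1)) x = 0 → x ∈ Q' := by
    intro x hxA' hxj hz
    obtain ⟨hxi, hxA⟩ := (memA' x).1 hxA'
    have hxb := hinv.boundA x hxA
    rw [hat _ hxb.1 hxb.2, if_neg hxj] at hz
    have hmem := hinv.complete x hxA hz
    rw [hQeq] at hmem
    rcases List.mem_append.1 hmem with h | h
    · exact h
    · simp only [List.mem_singleton] at h
      exact absurd h hxi
  have hbound' : ∀ x ∈ A', 0 ≤ x ∧ x < (M.length : Int) :=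
    fun x hx => hinv.boundA x ((memA' x).1 hx).2
  have hnodupA' : A'.Nodup := by rw [hA']; exact hinv.nodupA.erase i
  have hsubA' : A'.Sublist A := by rw [hA']; exact List.erase_sublist
  have hjA' : PySem.List.pyGetD M i 0 ∈ A' := (memA' _).2 ⟨hji, hjA⟩
  have hcyc' : ∀ t : Nat, pvCyc M t → ((t : Nat) : Int) ∈ A' := by
    intro t ht
    have htA := hinv.cyc t ht
    have hpos := pvCyc_count_pos M hPre hinv ht
    refine (memA' _).2 ⟨?_, htA⟩
    intro e
    rw [e] at hpos
    omega
  refine ⟨memA', hsubA', hzi, hi, hj, hcnt', ?_, ?_⟩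
  · intro hc
    refine ⟨?_, hbound', ?_, ?_, ?_, ?_, lenC', hcnt', hrem', hcyc'⟩
    · exact hnodupA'
    · refine List.nodup_append.2 ⟨hQ'nodup.1, List.nodup_singleton _, ?_⟩
      intro a ha b hb
      simp only [List.mem_singleton] at hb
      subst hb
      exact hQ'ne_j a ha
    · intro x hx
      rcases List.mem_append.1 hx with h | h
      · exact hQ'A' x h
      · simp only [List.mem_singleton] at h
        subst h
        exact hjA'
    · intro x hx
      rcases List.mem_append.1 hx with h | h
      · exact hzQ' x h
      · simp only [List.mem_singleton] at h
        subst h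
        exact hc
    · intro x hxA' hz
      by_cases hxj : x = PySem.List.pyGetD M i 0
      · subst hxj
        exact List.mem_append.2 (Or.inr (by simp))
      · exact List.mem_append.2 (Or.inl (hcomp' x hxA' hxj hz))
  · intro hc
    refine ⟨hnodupA', hbound', hQ'nodup.1, hQ'A', hzQ', ?_, lenC', hcnt', hrem', hcyc'⟩
    intro x hxA' hz
    by_cases hxj : x = PySem.List.pyGetD M i 0
    · exfalso
      apply hc
      subst hxj
      exact hz
    · exact hcomp' x hxA' hxj hz

theorem pvPeel_spec (M : List Int) (hPre : pvNice M) :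
    ∀ (A count Q : List Int), pvInv M A count Q →
      (pvPeel M A count Q).Sublist A ∧
      (∀ j ∈ pvPeel M A count Q, ∃ i ∈ pvPeel M A count Q, PySem.List.pyGetD M i 0 = j) ∧
      (∀ X : Int → Prop, (∀ x, X x → x ∈ A) →
        (∀ x, X x → ∃ y, X y ∧ PySem.List.pyGetD M y 0 = x) →
        ∀ x, X x → x ∈ pvPeel M A count Q) := by
  intro A count Q
  induction A, count, Q using pvPeel.induct M with
  | case1 A count =>
    intro hinv
    rw [pvPeel]
    refine ⟨List.Sublist.refl A, fun j hj => ?_, fun X hX1 _ x hx => hX1 x hx⟩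
    have hb := hinv.boundA j hj
    have hnz : pvCountAt count j ≠ 0 := fun hz => absurd (hinv.complete j hj hz) (by simp)
    rw [hinv.cnt j hb.1 hb.2] at hnz
    have hpos : 0 < A.countP (fun i => PySem.List.pyGetD M i 0 == j) := by
      by_contra hle
      exact hnz (by omega)
    obtain ⟨i, hiA, hpi⟩ := List.countP_pos_iff.1 hpos
    exact ⟨i, hiA, by simpa using hpi⟩
  | case2 A count q qs hp =>
    intro _
    rw [← List.dropLast_append_getLast (l := q :: qs) (by simp), PySem.List.pop?_last] at hp
    simp at hp
  | case3 A count q qs i Q' hp hr =>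
    intro hinv
    have hQeq : q :: qs = Q' ++ [i] := pvPop_eq (by simp) hp
    have hiQ : i ∈ q :: qs := by rw [hQeq]; exact List.mem_append.2 (Or.inr (by simp))
    have hiA : i ∈ A := hinv.subQ i hiQ
    rw [PySem.Set.remove?_of_mem hiA] at hr
    simp at hr
  | case4 A count q qs i Q' hp A' hr j count' hc ih =>
    intro hinv
    obtain ⟨memA', hsubA', hzi, -, -, -, hinew0, -⟩ := pvStepInv M hPre hp hr hinv
    obtain ⟨s1, s2, s3⟩ := ih (hinew0 hc)
    have hred : pvPeel M A count (q :: qs)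
        = pvPeel M A' (pvAdjust count (PySem.List.pyGetD M i 0) (-1))
            (Q' ++ [PySem.List.pyGetD M i 0]) := by
      rw [pvPeel_cons M A count q qs hp hr, if_pos hc]
    rw [hred]
    exact ⟨s1.trans hsubA', s2,
      fun X hX1 hX2 x hx =>
        s3 X (fun x hx => pvXsub M hinv memA' hzi X hX1 hX2 x hx) hX2 x hx⟩
  | case5 A count q qs i Q' hp A' hr j count' hc ih =>
    intro hinv
    obtain ⟨memA', hsubA', hzi, -, -, -, -, hinew1⟩ := pvStepInv M hPre hp hr hinv
    obtain ⟨s1, s2, s3⟩ := ih (hinew1 hc)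
    have hred : pvPeel M A count (q :: qs)
        = pvPeel M A' (pvAdjust count (PySem.List.pyGetD M i 0) (-1)) Q' := by
      rw [pvPeel_cons M A count q qs hp hr, if_neg hc]
    rw [hred]
    exact ⟨s1.trans hsubA', s2,
      fun X hX1 hX2 x hx =>
        s3 X (fun x hx => pvXsub M hinv memA' hzi X hX1 hX2 x hx) hX2 x hx⟩

-- ===== B-side: the boolean image iteration computes T k =====
theorem pvFoldConst {α β : Type} (f : α → α) (l : List β) (init : α) :
    l.foldl (fun a _ => f a) init = f^[l.length] init := by
  induction l generalizing init with
  | nil => rfl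
  | cons x xs ih => simp [List.foldl_cons, ih, Function.iterate_succ_apply]

theorem pvImage_spec (f : List Int) (hPre : pvNice f)
    {alive : List Bool} (hl : alive.length = f.length) :
    (pvImage f alive).length = f.length ∧
    (∀ j : Nat, j < f.length →
      ((pvImage f alive).getD j false = true ↔
        ∃ i : Nat, i < f.length ∧ alive.getD i false = true ∧ pvm f i = j)) := by
  have key : ∀ b : Nat, b ≤ f.length →
      (((PySem.List.pyRange 0 (b : Int) 1).foldl
        (fun img i => if PySem.List.pyGetD alive i false then
          PySem.List.pySetD img (PySem.List.pyGetD f i 0) true else img)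
        (List.replicate f.length false)).length = f.length ∧
      ∀ j : Nat, j < f.length →
        (((PySem.List.pyRange 0 (b : Int) 1).foldl
          (fun img i => if PySem.List.pyGetD alive i false then
            PySem.List.pySetD img (PySem.List.pyGetD f i 0) true else img)
          (List.replicate f.length false)).getD j false = true
          ↔ ∃ i : Nat, i < b ∧ alive.getD i false = true ∧ pvm f i = j)) := by
    intro b
    induction b with
    | zero =>
      intro _
      rw [show ((0 : Nat) : Int) = 0 from rfl, PySem.List.pyRange_one_eq_nil (le_refl 0)]
      refine ⟨by simp, fun j hj => ?_⟩
      simp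
    | succ b ih =>
      intro hb
      obtain ⟨ihl, ihm⟩ := ih (by omega)
      have hsplit : PySem.List.pyRange 0 ((b + 1 : Nat) : Int) 1
          = PySem.List.pyRange 0 (b : Int) 1 ++ [(b : Int)] := by
        rw [show ((b + 1 : Nat) : Int) = (b : Int) + 1 by push_cast; ring]
        exact PySem.List.pyRange_one_succ_right (by positivity)
      rw [hsplit, List.foldl_append]
      have hbn : b < f.length := by omega
      have hM := pvPre_nat hPre hbn
      have hgA : PySem.List.pyGetD alive (b : Int) false = alive.getD b false := by
        simp [PySem.List.pyGetD_natCast]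
      have hgM : PySem.List.pyGetD f (b : Int) 0 = f.getD b 0 := by
        simp [PySem.List.pyGetD_natCast]
      simp only [List.foldl_cons, List.foldl_nil, hgA, hgM]
      by_cases ha : alive.getD b false = true
      · rw [if_pos ha, PySem.List.pySetD_of_nonneg _ _ hM.2.1]
        have hset : (f.getD b 0).toNat = pvm f b := rfl
        refine ⟨by simpa using ihl, fun j hj => ?_⟩
        have hjlt : j < (((PySem.List.pyRange 0 (b : Int) 1).foldl
            (fun img i => if PySem.List.pyGetD alive i false then
              PySem.List.pySetD img (PySem.List.pyGetD f i 0) true else img)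
            (List.replicate f.length false)).set (f.getD b 0).toNat true).length := by
          simpa [ihl] using hj
        rw [List.getD_eq_getElem _ _ hjlt, List.getElem_set]
        constructor
        · intro hcase
          split at hcase
          · exact ⟨b, by omega, ha, by rw [← hset]; omega⟩
          · have := (ihm j hj).1 (by
              rwa [List.getD_eq_getElem _ _ (by simpa [ihl] using hj)])
            obtain ⟨i, hi, h1, h2⟩ := this
            exact ⟨i, by omega, h1, h2⟩
        · rintro ⟨i, hi, h1, h2⟩
          by_cases hib : i = b
          · subst hib
            rw [if_pos (by rw [hset]; omega)]
          · have hib' : i < b := by omega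
            have := (ihm j hj).2 ⟨i, hib', h1, h2⟩
            rw [List.getD_eq_getElem _ _ (by simpa [ihl] using hj)] at this
            split
            · rfl
            · exact this
      · rw [if_neg ha]
        refine ⟨ihl, fun j hj => ?_⟩
        rw [ihm j hj]
        constructor
        · rintro ⟨i, hi, h1, h2⟩
          exact ⟨i, by omega, h1, h2⟩
        · rintro ⟨i, hi, h1, h2⟩
          by_cases hib : i = b
          · subst hib; exact absurd h1 ha
          · exact ⟨i, by omega, h1, h2⟩
  have := key f.length (le_refl _)
  unfold pvImage
  exact this

theorem pvAlive_iter (f : List Int) (hPre : pvNice f) :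
    ∀ k : Nat, ((pvImage f ·)^[k] (List.replicate f.length true)).length = f.length ∧
      ∀ j : Nat, j < f.length →
        (((pvImage f ·)^[k] (List.replicate f.length true)).getD j false = true ↔ j ∈ pvT f k) := by
  intro k
  induction k with
  | zero =>
    refine ⟨by simp, fun j hj => ?_⟩
    simp [pvT, hj]
  | succ k ih =>
    obtain ⟨ihl, ihm⟩ := ih
    rw [Function.iterate_succ_apply']
    obtain ⟨hl, hm⟩ := pvImage_spec f hPre ihl
    refine ⟨hl, fun j hj => ?_⟩
    rw [hm j hj]
    simp only [pvT, Finset.mem_image]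
    constructor
    · rintro ⟨i, hi, ha, rfl⟩
      exact ⟨i, (ihm i hi).1 ha, rfl⟩
    · rintro ⟨i, hi, rfl⟩
      have hilt : i < f.length := Finset.mem_range.1 (pvT_subset_range f hPre k hi)
      exact ⟨i, hilt, (ihm i hilt).2 hi, rfl⟩

-- ===== assembling both sides =====
theorem pvBody_eq_filter (f : List Int) (hPre : pvNice f) :
    pvBody f = (PySem.List.pyRange 0 f.length 1).filter
      (fun x => decide (0 ≤ x ∧ x < (f.length : Int) ∧ x.toNat ∈ pvT f f.length)) := by
  have hlen : (PySem.List.pyRange 0 (f.length : Int) 1).length = f.length := by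
    simp [PySem.List.length_pyRange_one]
  have halive : (PySem.List.pyRange 0 (f.length : Int) 1).foldl (fun al _ => pvImage f al)
        (List.replicate f.length true)
      = (pvImage f ·)^[f.length] (List.replicate f.length true) := by
    rw [pvFoldConst, hlen]
  show (PySem.List.pyRange 0 (f.length : Int) 1).filter
        (fun i => PySem.List.pyGetD ((PySem.List.pyRange 0 (f.length : Int) 1).foldl
          (fun al _ => pvImage f al) (List.replicate f.length true)) i false) = _
  rw [halive]
  apply List.filter_congr
  intro x hx
  obtain ⟨hx0, hx1⟩ := PySem.List.mem_pyRange_one.1 hx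
  obtain ⟨hal, ham⟩ := pvAlive_iter f hPre f.length
  have hg : PySem.List.pyGetD ((pvImage f ·)^[f.length] (List.replicate f.length true)) x false
      = ((pvImage f ·)^[f.length] (List.replicate f.length true)).getD x.toNat false :=
    pvGetD_int _ _ hx0 (by rw [hal]; exact hx1)
  rw [hg]
  have hx2 : x.toNat < f.length := by omega
  have hiff := ham x.toNat hx2
  by_cases hb : ((pvImage f ·)^[f.length] (List.replicate f.length true)).getD x.toNat false = true
  · rw [hb]
    symm
    rw [decide_eq_true_iff]
    exact ⟨hx0, hx1, hiff.1 hb⟩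
  · rw [Bool.not_eq_true] at hb
    rw [hb]
    symm
    rw [decide_eq_false_iff_not]
    rintro ⟨-, -, hmem⟩
    rw [hiff.2 hmem] at hb
    exact Bool.noConfusion hb

-- count initialisation: the bump-fold computes occurrence counts
theorem pvBumpFold (l : List Int) : ∀ (c0 : List Int), (∀ x ∈ l, 0 ≤ x ∧ x < (c0.length : Int)) →
    (l.foldl (fun c i => pvAdjust c i 1) c0).length = c0.length ∧
    ∀ j : Int, 0 ≤ j → j < (c0.length : Int) →
      pvCountAt (l.foldl (fun c i => pvAdjust c i 1) c0) j = pvCountAt c0 j + l.count j := by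
  induction l with
  | nil => intro c0 _; exact ⟨rfl, by simp⟩
  | cons x xs ih =>
    intro c0 hb
    obtain ⟨hx0, hx1⟩ := hb x List.mem_cons_self
    have hlen : (pvAdjust c0 x 1).length = c0.length := pvAdjust_length c0 x 1
    have hb' : ∀ y ∈ xs, 0 ≤ y ∧ y < ((pvAdjust c0 x 1).length : Int) := by
      intro y hy; rw [hlen]; exact hb y (List.mem_cons_of_mem _ hy)
    obtain ⟨ihl, ihm⟩ := ih (pvAdjust c0 x 1) hb'
    simp only [List.foldl_cons]
    refine ⟨by rw [ihl, hlen], fun j hj0 hj1 => ?_⟩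
    rw [ihm j hj0 (by rw [hlen]; exact hj1)]
    rw [pvAdjust_at c0 j 1 hx0 hx1 hj0 hj1]
    rw [List.count_cons]
    by_cases hjx : j = x
    · subst hjx
      simp only [if_pos rfl, beq_self_eq_true, if_true]
      push_cast
      omega
    · rw [if_neg hjx, if_neg (by simpa using fun e => hjx e.symm)]
      omega

theorem pvCountP_range (M : List Int) (j : Int) :
    (PySem.List.pyRange 0 (M.length : Int) 1).countP (fun i => PySem.List.pyGetD M i 0 == j)
      = M.count j := by
  have hmap := PySem.List.map_pyGetD_pyRange_zero M 0
  have h1 : (PySem.List.pyRange 0 (M.length : Int) 1).countP (fun i => PySem.List.pyGetD M i 0 == j)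
      = ((PySem.List.pyRange 0 (M.length : Int) 1).map (fun i => PySem.List.pyGetD M i 0)).countP
          (fun v => v == j) := by
    rw [List.countP_map]; rfl
  rw [h1]
  rw [show PySem.List.pyRange 0 (M.length : Int) 1 = PySem.List.pyRange 0 (PySem.List.len M) 1 by
    rw [PySem.List.len_eq]]
  rw [hmap, List.count_eq_countP]

-- the initial state of A's loop, named for reuse
def pvCount0 (M : List Int) : List Int :=
  M.foldl (fun c i => pvAdjust c i 1) (List.replicate M.length 0)

def pvQ0 (M : List Int) : List Int :=
  (PySem.List.pyRange 0 M.length 1).filter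
    (fun i => PySem.List.pyGetD (pvCount0 M) i 0 == 0)

theorem pvLMP_eq (M : List Int) :
    loop_max_perm M
      = pvPeel M (PySem.List.pyRange 0 M.length 1) (pvCount0 M) (pvQ0 M) := by
  have hA0 : PySem.Set.ofList (PySem.List.pyRange 0 (M.length : Int) 1)
      = PySem.List.pyRange 0 (M.length : Int) 1 :=
    PySem.Set.ofList_eq_self_of_nodup _ (PySem.List.nodup_pyRange_one 0 _)
  show pvPeel M (PySem.Set.ofList (PySem.List.pyRange 0 (M.length : Int) 1)) _ _ = _
  rw [hA0]
  rfl

theorem pvInitInv (M : List Int) (hPre : pvNice M) :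
    pvInv M (PySem.List.pyRange 0 M.length 1) (pvCount0 M) (pvQ0 M) := by
  have hbounds : ∀ x ∈ M, 0 ≤ x ∧ x < ((List.replicate M.length (0 : Int)).length : Int) := by
    intro x hx; simpa using hPre x hx
  obtain ⟨hclen, hcval⟩ := pvBumpFold M (List.replicate M.length 0) hbounds
  have hclen' : (pvCount0 M).length = M.length := by simpa [pvCount0] using hclen
  have hcval' : ∀ j : Int, 0 ≤ j → j < (M.length : Int) →
      pvCountAt (pvCount0 M) j = M.count j := by
    intro j h0 h1
    have := hcval j h0 (by simpa using h1)
    rw [pvCount0, this]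
    have hz : pvCountAt (List.replicate M.length (0 : Int)) j = 0 := by
      unfold pvCountAt
      rw [PySem.List.pyGetD_eq_getElem _ _ h0 (by simpa using h1)]
      simp
    omega
  have hcnt0 : ∀ j : Int, 0 ≤ j → j < (M.length : Int) →
      pvCountAt (pvCount0 M) j
        = ((PySem.List.pyRange 0 (M.length : Int) 1).countP
            (fun i => PySem.List.pyGetD M i 0 == j) : Int) := by
    intro j h0 h1
    rw [hcval' j h0 h1, pvCountP_range M j]
  constructor
  · exact PySem.List.nodup_pyRange_one 0 _
  · exact fun x hx => PySem.List.mem_pyRange_one.1 hx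
  · exact (PySem.List.nodup_pyRange_one 0 _).filter _
  · exact fun q hq => List.mem_of_mem_filter hq
  · intro q hq
    have := List.of_mem_filter hq
    simpa [pvCountAt] using this
  · intro j hj hz
    refine List.mem_filter.2 ⟨hj, ?_⟩
    simpa [pvCountAt] using hz
  · exact hclen'
  · exact hcnt0
  · intro j h0 h1 hnA
    exact absurd (PySem.List.mem_pyRange_one.2 ⟨h0, h1⟩) hnA
  · intro t ht
    exact PySem.List.mem_pyRange_one.2 ⟨by positivity, by exact_mod_cast ht.1⟩

theorem pvA_mem (M : List Int) (hPre : pvNice M) :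
    (loop_max_perm M).Sublist (PySem.List.pyRange 0 M.length 1) ∧
    (∀ x : Int, x ∈ loop_max_perm M ↔ 0 ≤ x ∧ x < (M.length : Int) ∧ x.toNat ∈ pvT M M.length) := by
  have hinv := pvInitInv M hPre
  obtain ⟨hsub, hfix, hgfp⟩ := pvPeel_spec M hPre _ _ _ hinv
  have hR := pvLMP_eq M
  rw [hR] at *
  set R := pvPeel M (PySem.List.pyRange 0 M.length 1) (pvCount0 M) (pvQ0 M) with hRdef
  refine ⟨hsub, fun x => ?_⟩
  constructor
  · intro hxR
    have hxA := hsub.mem hxR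
    obtain ⟨hx0, hx1⟩ := PySem.List.mem_pyRange_one.1 hxA
    refine ⟨hx0, hx1, ?_⟩
    have hS0 : (R.map Int.toNat).toFinset ⊆ Finset.range M.length := by
      intro j hj
      simp only [List.mem_toFinset, List.mem_map] at hj
      obtain ⟨y, hy, rfl⟩ := hj
      obtain ⟨hy0, hy1⟩ := PySem.List.mem_pyRange_one.1 (hsub.mem hy)
      exact Finset.mem_range.2 (by omega)
    have hS : (R.map Int.toNat).toFinset ⊆ ((R.map Int.toNat).toFinset).image (pvm M) := by
      intro j hj
      simp only [List.mem_toFinset, List.mem_map] at hj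
      obtain ⟨y, hy, rfl⟩ := hj
      obtain ⟨i, hiR, hival⟩ := hfix y hy
      obtain ⟨hi0, hi1⟩ := PySem.List.mem_pyRange_one.1 (hsub.mem hiR)
      refine Finset.mem_image.2 ⟨i.toNat, ?_, ?_⟩
      · simp only [List.mem_toFinset, List.mem_map]; exact ⟨i, hiR, rfl⟩
      · unfold pvm
        rw [← pvGetD_int M 0 hi0 hi1, hival]
    have := pvT_gfp_upper M _ hS0 hS M.length
    exact this (by simp only [List.mem_toFinset, List.mem_map]; exact ⟨x, hxR, rfl⟩)
  · rintro ⟨hx0, hx1, hxT⟩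
    refine hgfp (fun y => 0 ≤ y ∧ y < (M.length : Int) ∧ y.toNat ∈ pvT M M.length)
      (fun y hy => PySem.List.mem_pyRange_one.2 ⟨hy.1, hy.2.1⟩) ?_ x ⟨hx0, hx1, hxT⟩
    rintro y ⟨hy0, hy1, hyT⟩
    have hfixT := pvT_fixed M hPre
    rw [hfixT] at hyT
    obtain ⟨i, hiT, hival⟩ := Finset.mem_image.1 hyT
    have hilt : i < M.length := Finset.mem_range.1 (pvT_subset_range M hPre M.length hiT)
    refine ⟨(i : Int), ⟨by positivity, by exact_mod_cast hilt, by simpa using hiT⟩, ?_⟩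
    have hg : PySem.List.pyGetD M (i : Int) 0 = M.getD i 0 := by
      have := pvGetD_int M (x := (i : Int)) 0 (by positivity) (by exact_mod_cast hilt)
      simpa using this
    rw [hg]
    have := (pvPre_nat hPre hilt).2.1
    unfold pvm at hival
    omega

theorem pvMain (f : List Int) (hPre : pvNice f) :
    loop_max_perm f = pvBody f := by
  obtain ⟨hsub, hmem⟩ := pvA_mem f hPre
  rw [pvBody_eq_filter f hPre]
  have hPW : (loop_max_perm f).Pairwise (· < ·) :=
    (PySem.List.pairwise_lt_pyRange_one 0 f.length).sublist hsub
  have hPW' : ((PySem.List.pyRange 0 f.length 1).filter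
      (fun x => decide (0 ≤ x ∧ x < (f.length : Int) ∧ x.toNat ∈ pvT f f.length))).Pairwise (· < ·) :=
    (PySem.List.pairwise_lt_pyRange_one 0 f.length).sublist List.filter_sublist
  have hperm : ((PySem.List.pyRange 0 f.length 1).filter
      (fun x => decide (0 ≤ x ∧ x < (f.length : Int) ∧ x.toNat ∈ pvT f f.length))).Perm
      (loop_max_perm f) := by
    rw [List.perm_ext_iff_of_nodup (hPW'.imp ne_of_lt) (hPW.imp ne_of_lt)]
    intro a
    rw [hmem a, List.mem_filter, PySem.List.mem_pyRange_one]
    simp only [decide_eq_true_eq]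
    constructor
    · rintro ⟨⟨h0, h1⟩, h2⟩; exact h2
    · rintro ⟨h0, h1, h2⟩; exact ⟨⟨h0, h1⟩, h0, h1, h2⟩
  calc loop_max_perm f
      = PySem.List.sorted (loop_max_perm f) (fun x => x) :=
        (PySem.List.sorted_eq_of_perm_of_pairwise_lt _ _ _ (List.Perm.refl _) hPW).symm
    _ = _ := PySem.List.sorted_eq_of_perm_of_pairwise_lt _ _ _ hperm hPW'

-- ===== wraparound: A on M equals A on the normalized list, under Pre_ =====
theorem pvMod_eq_self (x n : Int) (h0 : 0 ≤ x) (h1 : x < n) : PySem.Int.mod x n = x := by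
  rw [PySem.Int.mod_eq_emod_of_pos (by omega)]
  exact Int.emod_eq_of_lt h0 h1

theorem pvMod_neg (x n : Int) (hn : 0 < n) (h0 : -n ≤ x) (h1 : x < 0) :
    PySem.Int.mod x n = x + n := by
  rw [PySem.Int.mod_eq_emod_of_pos hn]
  calc x % n = (x + n * 1) % n := (Int.add_mul_emod_self_left x n 1).symm
    _ = x + n := by
        rw [mul_one]
        exact Int.emod_eq_of_lt (by omega) (by omega)

theorem pvGetD_wrapNeg (c : List Int) (j : Int)
    (h0 : -(c.length : Int) ≤ j) (h1 : j < 0) :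
    PySem.List.pyGetD c j 0 = PySem.List.pyGetD c (j + c.length) 0 := by
  obtain ⟨k, hk1, hk2, rfl⟩ : ∃ k : Nat, 0 < k ∧ k ≤ c.length ∧ j = -(k : Int) :=
    ⟨(-j).toNat, by omega, by omega, by omega⟩
  rw [PySem.List.pyGetD_neg_natCast c k 0 hk1 hk2,
      PySem.List.pyGetD_eq_getElem _ _ (by omega) (by omega)]
  congr 1
  omega

theorem pvSetD_wrapNeg (c : List Int) (j v : Int)
    (h0 : -(c.length : Int) ≤ j) (h1 : j < 0) :
    PySem.List.pySetD c j v = PySem.List.pySetD c (j + c.length) v := by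
  unfold PySem.List.pySetD PySem.List.pySet? PySem.List.pyIdx?
  rw [if_neg (by omega), if_pos h0, if_pos (by omega), if_pos (by omega)]
  simp only [Option.map_some, Option.getD_some]
  congr 1
  omega

theorem pvAdjust_wrapNeg (c : List Int) (j δ : Int)
    (h0 : -(c.length : Int) ≤ j) (h1 : j < 0) :
    pvAdjust c j δ = pvAdjust c (j + c.length) δ := by
  unfold pvAdjust
  rw [pvGetD_wrapNeg c j h0 h1, pvSetD_wrapNeg c j _ h0 h1]

theorem pvFoldAdjust_wrap (n : Nat) :
    ∀ (l : List Int), (∀ x ∈ l, -(n : Int) ≤ x ∧ x < (n : Int)) →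
      ∀ c0 : List Int, c0.length = n →
        l.foldl (fun c i => pvAdjust c i 1) c0
          = l.foldl (fun c i => pvAdjust c (PySem.Int.mod i (n : Int)) 1) c0 := by
  intro l
  induction l with
  | nil => intro _ c0 _; rfl
  | cons x xs ih =>
    intro hb c0 hlen
    obtain ⟨hx0, hx1⟩ := hb x List.mem_cons_self
    simp only [List.foldl_cons]
    have hstep : pvAdjust c0 x 1 = pvAdjust c0 (PySem.Int.mod x (n : Int)) 1 := by
      by_cases hx : 0 ≤ x
      · rw [pvMod_eq_self x _ hx hx1]
      · rw [pvMod_neg x _ (by omega) hx0 (by omega),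
            pvAdjust_wrapNeg c0 x 1 (by omega) (by omega), hlen]
    rw [hstep]
    exact ih (fun y hy => hb y (List.mem_cons_of_mem _ hy)) _
      (by rw [pvAdjust_length, hlen])

theorem pvNorm_length (M : List Int) : (pvNorm M).length = M.length := by
  simp [pvNorm]

theorem pvNice_norm (M : List Int) : pvNice (pvNorm M) := by
  intro y hy
  rw [pvNorm_length]
  obtain ⟨x, hx, rfl⟩ := List.mem_map.1 hy
  have hn : 0 < M.length := List.length_pos_of_mem hx
  exact ⟨PySem.Int.mod_nonneg _ (by exact_mod_cast hn),
         PySem.Int.mod_lt _ (by exact_mod_cast hn)⟩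

theorem pvf_eq (M : List Int) (hn : 0 < M.length) : pvf M = pvm (pvNorm M) := by
  funext j
  unfold pvf pvm
  by_cases hj : j < M.length
  · rw [List.getD_eq_getElem _ _ hj,
        List.getD_eq_getElem (pvNorm M) _ (show j < (pvNorm M).length by rwa [pvNorm_length])]
    simp [pvNorm]
  · rw [List.getD_eq_default _ _ (by omega),
        List.getD_eq_default _ _ (by rw [pvNorm_length]; omega)]
    rw [pvMod_eq_self 0 _ (le_refl 0) (by exact_mod_cast hn)]

theorem pvPre_cyc (M : List Int) (hn : 0 < M.length)
    (hb : ∀ x ∈ M, -(M.length : Int) ≤ x ∧ x < (M.length : Int))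
    (h : ∀ x ∈ M, x < 0 →
      ∃ k ∈ Finset.Icc 1 M.length,
        (pvf M)^[k] (x + M.length).toNat = (x + M.length).toNat) :
    ∀ x ∈ M, x < 0 → pvCyc (pvNorm M) (x + M.length).toNat := by
  intro x hx hneg
  obtain ⟨k, hk, hfix⟩ := h x hx hneg
  have hbx := hb x hx
  refine ⟨by rw [pvNorm_length]; omega, ⟨k, by rwa [pvNorm_length], ?_⟩⟩
  rw [← pvf_eq M hn]
  exact hfix

-- fuel-indexed reformulation of the while-loop (for relating the two M's)
theorem pvPeel_cons_none (M A count : List Int) (q : Int) (qs : List Int) {i : Int}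
    {Q' : List Int}
    (hp : PySem.List.pop? (q :: qs) (-1) = some (i, Q'))
    (hr : PySem.Set.remove? A i = none) :
    pvPeel M A count (q :: qs) = A := by
  conv_lhs => rw [pvPeel]
  split
  all_goals try rfl
  all_goals
    next i1 Q1 heq =>
      rw [hp] at heq
      injection heq with h
      injection h with h1 h2
      subst h1
      subst h2
      split
      all_goals try rfl
      all_goals (next A1 heq2 => rw [hr] at heq2; simp at heq2)

def pvPeelF (M : List Int) : Nat → List Int → List Int → List Int → List Int
  | 0, A, _, _ => A
  | fuel + 1, A, count, Q =>
    match Q with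
    | [] => A
    | q :: qs =>
      match PySem.List.pop? (q :: qs) (-1) with
      | none => A
      | some (i, Q') =>
        match PySem.Set.remove? A i with
        | none => A
        | some A' =>
          let j := PySem.List.pyGetD M i 0
          let count' := pvAdjust count j (-1)
          if PySem.List.pyGetD count' j 0 = 0 then pvPeelF M fuel A' count' (Q' ++ [j])
          else pvPeelF M fuel A' count' Q'

theorem pvPeelF_eq (M : List Int) : ∀ (fuel : Nat) (A count Q : List Int),
    2 * A.length + Q.length ≤ fuel → pvPeelF M fuel A count Q = pvPeel M A count Q := by
  intro fuel
  induction fuel with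
  | zero =>
    intro A count Q h
    have hQ : Q = [] := List.length_eq_zero_iff.1 (by omega)
    subst hQ
    rw [pvPeel]
    rfl
  | succ fuel ih =>
    intro A count Q h
    match Q with
    | [] => rw [pvPeel]; rfl
    | q :: qs =>
      rw [pvPeelF]
      rcases hpop : PySem.List.pop? (q :: qs) (-1) with - | ⟨i, Q'⟩
      · rw [← List.dropLast_append_getLast (l := q :: qs) (by simp), PySem.List.pop?_last] at hpop
        simp at hpop
      · have hql := PySem.List.length_of_pop?_eq_some (q :: qs) hpop
        rcases hrem : PySem.Set.remove? A i with - | A'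
        · rw [pvPeel_cons_none M A count q qs hpop hrem]
          simp only [hrem]
        · have hAl := pvRemove?_lt hrem
          simp only [hrem]
          rw [pvPeel_cons M A count q qs hpop hrem]
          simp only [List.length_cons] at h hql
          split
          · next hc =>
            rw [ih A' _ (Q' ++ [PySem.List.pyGetD M i 0])
              (by simp only [List.length_append, List.length_cons, List.length_nil]; omega)]
          · next hc =>
            rw [ih A' _ Q' (by omega)]

-- the peeling on M and on the normalized list run in lockstep: under the invariant no
-- negative literal is ever enqueued (its wrapped target is a cycle node of positive count)
theorem pvPeelF_wrap (M : List Int)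
    (hb : ∀ x ∈ M, -(M.length : Int) ≤ x ∧ x < (M.length : Int))
    (hcy : ∀ x ∈ M, x < 0 → pvCyc (pvNorm M) (x + M.length).toNat) :
    ∀ (fuel : Nat) (A count Q : List Int), pvInv (pvNorm M) A count Q →
      pvPeelF M fuel A count Q = pvPeelF (pvNorm M) fuel A count Q := by
  intro fuel
  induction fuel with
  | zero => intro A count Q _; rfl
  | succ fuel ih =>
    intro A count Q hinv
    match Q with
    | [] => rfl
    | q :: qs =>
      conv_lhs => rw [pvPeelF]
      conv_rhs => rw [pvPeelF]
      rcases hpop : PySem.List.pop? (q :: qs) (-1) with - | ⟨i, Q'⟩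
      · simp only [hpop]
      · simp only [hpop]
        rcases hrem : PySem.Set.remove? A i with - | A'
        · simp only [hrem]
        · simp only [hrem]
          have hPreF : pvNice (pvNorm M) := pvNice_norm M
          obtain ⟨memA', hsubA', hzi, hi, hjF, hcntF, hinv0, hinv1⟩ :=
            pvStepInv (pvNorm M) hPreF hpop hrem hinv
          rw [pvNorm_length] at hi
          have hn : 0 < M.length := by omega
          have hjM_mem : PySem.List.pyGetD M i 0 ∈ M := by
            rw [PySem.List.pyGetD_eq_getElem M 0 hi.1 hi.2]
            exact List.getElem_mem _
          obtain ⟨hbj1, hbj2⟩ := hb _ hjM_mem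
          have hjrel : PySem.List.pyGetD (pvNorm M) i 0
              = PySem.Int.mod (PySem.List.pyGetD M i 0) (M.length : Int) := by
            rw [PySem.List.pyGetD_eq_getElem M 0 hi.1 hi.2,
                PySem.List.pyGetD_eq_getElem (pvNorm M) 0 hi.1
                  (by rw [pvNorm_length]; exact hi.2)]
            simp [pvNorm]
          have hcount_len : count.length = M.length := by
            rw [hinv.lenC, pvNorm_length]
          have hadj : pvAdjust count (PySem.List.pyGetD M i 0) (-1)
              = pvAdjust count (PySem.List.pyGetD (pvNorm M) i 0) (-1) := by
            rw [hjrel]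
            by_cases hjn : 0 ≤ PySem.List.pyGetD M i 0
            · rw [pvMod_eq_self _ _ hjn hbj2]
            · rw [pvMod_neg _ _ (by exact_mod_cast hn) hbj1 (by omega)]
              have := pvAdjust_wrapNeg count (PySem.List.pyGetD M i 0) (-1)
                (by rw [hcount_len]; exact hbj1) (by omega)
              rw [this, hcount_len]
          have hlenadj : ((pvAdjust count (PySem.List.pyGetD (pvNorm M) i 0) (-1)).length : Int)
              = (M.length : Int) := by
            rw [pvAdjust_length, hcount_len]
          have hcond : PySem.List.pyGetD
                (pvAdjust count (PySem.List.pyGetD (pvNorm M) i 0) (-1))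
                (PySem.List.pyGetD M i 0) 0
              = PySem.List.pyGetD
                (pvAdjust count (PySem.List.pyGetD (pvNorm M) i 0) (-1))
                (PySem.List.pyGetD (pvNorm M) i 0) 0 := by
            rw [hjrel]
            by_cases hjn : 0 ≤ PySem.List.pyGetD M i 0
            · rw [pvMod_eq_self _ _ hjn hbj2]
            · rw [pvMod_neg _ _ (by exact_mod_cast hn) hbj1 (by omega)]
              have := pvGetD_wrapNeg
                (pvAdjust count (PySem.Int.mod (PySem.List.pyGetD M i 0) (M.length : Int)) (-1))
                (PySem.List.pyGetD M i 0)
                (by rw [pvAdjust_length, hcount_len]; exact hbj1) (by omega)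
              rw [pvMod_neg _ _ (by exact_mod_cast hn) hbj1 (by omega)] at this
              rw [this, pvAdjust_length, hcount_len]
          show (if PySem.List.pyGetD (pvAdjust count (PySem.List.pyGetD M i 0) (-1))
                  (PySem.List.pyGetD M i 0) 0 = 0 then
                pvPeelF M fuel A' (pvAdjust count (PySem.List.pyGetD M i 0) (-1))
                  (Q' ++ [PySem.List.pyGetD M i 0])
              else pvPeelF M fuel A' (pvAdjust count (PySem.List.pyGetD M i 0) (-1)) Q')
            = (if PySem.List.pyGetD (pvAdjust count (PySem.List.pyGetD (pvNorm M) i 0) (-1))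
                  (PySem.List.pyGetD (pvNorm M) i 0) 0 = 0 then
                pvPeelF (pvNorm M) fuel A'
                  (pvAdjust count (PySem.List.pyGetD (pvNorm M) i 0) (-1))
                  (Q' ++ [PySem.List.pyGetD (pvNorm M) i 0])
              else pvPeelF (pvNorm M) fuel A'
                  (pvAdjust count (PySem.List.pyGetD (pvNorm M) i 0) (-1)) Q')
          rw [hadj, hcond]
          by_cases hc : PySem.List.pyGetD
              (pvAdjust count (PySem.List.pyGetD (pvNorm M) i 0) (-1))
              (PySem.List.pyGetD (pvNorm M) i 0) 0 = 0
          · rw [if_pos hc, if_pos hc]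
            have hjnn : 0 ≤ PySem.List.pyGetD M i 0 := by
              by_contra hneg
              push_neg at hneg
              have hcyc := hcy _ hjM_mem hneg
              have hmodeq : PySem.Int.mod (PySem.List.pyGetD M i 0) (M.length : Int)
                  = PySem.List.pyGetD M i 0 + M.length :=
                pvMod_neg _ _ (by exact_mod_cast hn) hbj1 hneg
              have hjf_eq : PySem.List.pyGetD (pvNorm M) i 0
                  = (((PySem.List.pyGetD M i 0 + M.length).toNat : Nat) : Int) := by
                rw [hjrel, hmodeq]; omega
              obtain ⟨p, hpC, hpm⟩ := pvCyc_pred (pvNorm M) hPreF hcyc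
              have hpA : ((p : Nat) : Int) ∈ A := hinv.cyc p hpC
              have hppos := pvCyc_count_pos (pvNorm M) hPreF hinv hpC
              have hpne : ((p : Nat) : Int) ≠ i := by
                intro e; rw [e] at hppos; omega
              have hpA' : ((p : Nat) : Int) ∈ A' := (memA' _).2 ⟨hpne, hpA⟩
              have hgp : PySem.List.pyGetD (pvNorm M) ((p : Nat) : Int) 0
                  = PySem.List.pyGetD (pvNorm M) i 0 := by
                rw [PySem.List.pyGetD_natCast]
                have hplt := hpC.1
                have hmemp : (pvNorm M).getD p 0 ∈ pvNorm M := by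
                  rw [List.getD_eq_getElem _ _ hplt]; exact List.getElem_mem _
                have hbp := hPreF _ hmemp
                unfold pvm at hpm
                rw [hjf_eq]
                omega
              have hpos : 0 < A'.countP
                  (fun y => PySem.List.pyGetD (pvNorm M) y 0
                    == PySem.List.pyGetD (pvNorm M) i 0) :=
                List.countP_pos_iff.2 ⟨_, hpA', by simp [hgp]⟩
              have hcc := hcntF (PySem.List.pyGetD (pvNorm M) i 0) hjF.1 hjF.2
              unfold pvCountAt at hcc
              rw [hc] at hcc
              omega
            have hsame : PySem.List.pyGetD M i 0 = PySem.List.pyGetD (pvNorm M) i 0 := by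
              rw [hjrel, pvMod_eq_self _ _ hjnn hbj2]
            rw [hsame]
            exact ih A' _ _ (hinv0 hc)
          · rw [if_neg hc, if_neg hc]
            exact ih A' _ _ (hinv1 hc)

theorem pvWrap (M : List Int) (hn : 0 < M.length)
    (hb : ∀ x ∈ M, -(M.length : Int) ≤ x ∧ x < (M.length : Int))
    (hcy : ∀ x ∈ M, x < 0 → pvCyc (pvNorm M) (x + M.length).toNat) :
    loop_max_perm M = loop_max_perm (pvNorm M) := by
  have hc0 : pvCount0 (pvNorm M) = pvCount0 M := by
    unfold pvCount0 pvNorm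
    rw [List.foldl_map, List.length_map]
    exact (pvFoldAdjust_wrap M.length M hb _ (by simp)).symm
  have hq0 : pvQ0 (pvNorm M) = pvQ0 M := by
    unfold pvQ0
    rw [hc0, pvNorm_length]
  rw [pvLMP_eq M, pvLMP_eq (pvNorm M), hc0, hq0, pvNorm_length]
  have hinv := pvInitInv (pvNorm M) (pvNice_norm M)
  rw [hc0, hq0, pvNorm_length] at hinv
  rw [← pvPeelF_eq M (2 * (PySem.List.pyRange 0 (M.length : Int) 1).length + (pvQ0 M).length)
        _ _ _ (le_refl _),
      ← pvPeelF_eq (pvNorm M) (2 * (PySem.List.pyRange 0 (M.length : Int) 1).length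
        + (pvQ0 M).length) _ _ _ (le_refl _)]
  exact pvPeelF_wrap M hb hcy _ _ _ _ hinv

-- ===== VERDICT (by name: the statement is the Claim_ definition above) =====
theorem loop_max_perm_spec : Claim_equal_loop_max_perm := by
  intro M _hDom hPre
  unfold Spec_loop_max_perm
  obtain ⟨hb, hcy⟩ := hPre
  by_cases hM : M = []
  · subst hM
    show loop_max_perm [] = pvBody (pvNorm [])
    rw [show pvNorm [] = [] from rfl]
    exact pvMain [] (by intro x hx; simp at hx)
  · have hn : 0 < M.length := List.length_pos_of_ne_nil hM
    calc loop_max_perm M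
        = loop_max_perm (pvNorm M) := pvWrap M hn hb (pvPre_cyc M hn hb hcy)
      _ = pvBody (pvNorm M) := pvMain _ (pvNice_norm M)
      _ = loop_max_perm_alt M := rfl
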